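-- pv_equiv track=rewrite | github.com/tonglenovo/project | function.py | searchByKeyword
-- ===== SOURCE A (Python) =====
-- def searchByKeyword(listName,keyword):
--     getHotel = {'reviews':[], 'score':[],'hotel':[],'date':[],'country':[],'room':[],'title':[],'travellerType':[]}
--     for reviewsIndex in range(0,len(listName['reviews'])):
--         if(keyword in listName['reviews'][reviewsIndex].lower()):
--             getHotel['reviews'].append(listName['reviews'][reviewsIndex])
--             getHotel['score'].append(listName['score'][reviewsIndex])
--             getHotel['hotel'].append(listName['hotel'][reviewsIndex])
--             getHotel['date'].append(listName['date'][reviewsIndex])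
--             getHotel['country'].append(listName['country'][reviewsIndex])
--             getHotel['room'].append(listName['room'][reviewsIndex])
--             getHotel['title'].append(listName['title'][reviewsIndex])
--             getHotel['travellerType'].append(listName['travellerType'][reviewsIndex])
--     return getHotel
-- ===== SOURCE B (Python) =====
-- FIELDS = ('reviews', 'score', 'hotel', 'date', 'country', 'room', 'title', 'travellerType')
--
-- def searchByKeyword(listName, keyword):
--     # Row-oriented pipeline: transpose the parallel columns into row records,
--     # filter the records, then transpose the kept records back into columns.
--     # 'reviews' drives the filter and is required; absent auxiliary columns default to empty.
--     rows = zip(listName['reviews'], *(listName.get(f, ()) for f in FIELDS[1:]))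
--     kept = [row for row in rows if keyword in row[0].lower()]
--     return {f: [row[j] for row in kept] for j, f in enumerate(FIELDS)}
-- ===== Notes on version B (the rewrite author's own statement) =====
-- stated objective: alternative
-- what changed: A's column-oriented loop that appends to eight accumulator lists per matching row is replaced by a row-oriented pipeline: zip the eight parallel columns into row records, filter the records by the keyword test on the review component, and transpose the kept records back into columns.
import Mathlib
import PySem

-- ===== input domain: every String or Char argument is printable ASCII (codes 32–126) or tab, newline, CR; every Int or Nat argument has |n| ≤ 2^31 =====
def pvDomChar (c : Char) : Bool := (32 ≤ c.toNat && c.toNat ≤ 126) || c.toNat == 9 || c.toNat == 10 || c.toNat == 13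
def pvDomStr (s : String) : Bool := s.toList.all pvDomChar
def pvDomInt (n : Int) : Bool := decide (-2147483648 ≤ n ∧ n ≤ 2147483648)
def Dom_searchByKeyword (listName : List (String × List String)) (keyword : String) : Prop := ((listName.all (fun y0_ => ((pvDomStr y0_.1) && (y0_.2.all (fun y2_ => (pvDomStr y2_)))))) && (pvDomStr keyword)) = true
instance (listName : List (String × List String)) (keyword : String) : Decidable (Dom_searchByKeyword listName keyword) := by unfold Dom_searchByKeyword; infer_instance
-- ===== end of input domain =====

-- B replaces A's column-oriented append-to-eight-lists loop by a row-oriented pipeline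
-- (zip the columns into row records, filter the records, transpose back); objective:
-- alternative decomposition, same cost.


-- shared accessor: the column stored under key f (missing key → []); A additionally
-- indexes into it (out of range → ""); both raising cases are excluded by Pre_
def pvCol (listName : List (String × List String)) (f : String) : List String :=
  ((PySem.Dict.mk listName).get? f).getD []

def pvField (listName : List (String × List String)) (f : String) (i : Int) : String :=
  (PySem.List.pyGet? (pvCol listName f) i).getD ""

-- ===== PORT A =====
def searchByKeyword (listName : List (String × List String)) (keyword : String) : List (String × List String) :=
  let getHotel : PySem.Dict String (List String) := PySem.Dict.mk
    [("reviews", []), ("score", []), ("hotel", []), ("date", []),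
     ("country", []), ("room", []), ("title", []), ("travellerType", [])]
  ((PySem.List.pyRange 0 ((pvCol listName "reviews").length : Int) 1).foldl
    (fun g i =>
      if PySem.Str.isIn keyword (PySem.Str.lower (pvField listName "reviews" i)) then
        ((((((((g.modify "reviews" [] (· ++ [pvField listName "reviews" i])).modify
          "score" [] (· ++ [pvField listName "score" i])).modify
          "hotel" [] (· ++ [pvField listName "hotel" i])).modify
          "date" [] (· ++ [pvField listName "date" i])).modify
          "country" [] (· ++ [pvField listName "country" i])).modify
          "room" [] (· ++ [pvField listName "room" i])).modify
          "title" [] (· ++ [pvField listName "title" i])).modify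
          "travellerType" [] (· ++ [pvField listName "travellerType" i]))
      else g) getHotel).items

-- ===== PORT B =====
-- zip of the eight columns into row records, truncating at the shortest (Python's zip)
def pvZip8 : List String → List String → List String → List String → List String →
    List String → List String → List String →
    List (String × String × String × String × String × String × String × String)
  | a :: t1, b :: t2, c :: t3, d :: t4, e :: t5, f :: t6, g :: t7, h :: t8 =>
      (a, b, c, d, e, f, g, h) :: pvZip8 t1 t2 t3 t4 t5 t6 t7 t8
  | _, _, _, _, _, _, _, _ => []

def searchByKeyword_alt (listName : List (String × List String)) (keyword : String) : List (String × List String) :=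
  let rows := pvZip8 (pvCol listName "reviews") (pvCol listName "score")
    (pvCol listName "hotel") (pvCol listName "date") (pvCol listName "country")
    (pvCol listName "room") (pvCol listName "title") (pvCol listName "travellerType")
  let kept := rows.filter (fun r => PySem.Str.isIn keyword (PySem.Str.lower r.1))
  [("reviews", kept.map (·.1)), ("score", kept.map (·.2.1)), ("hotel", kept.map (·.2.2.1)),
   ("date", kept.map (·.2.2.2.1)), ("country", kept.map (·.2.2.2.2.1)),
   ("room", kept.map (·.2.2.2.2.2.1)), ("title", kept.map (·.2.2.2.2.2.2.1)),
   ("travellerType", kept.map (·.2.2.2.2.2.2.2))]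

-- ===== PRECONDITION & SPEC =====
-- Pre_ = exactly the inputs on which the Python A returns: key 'reviews' present (else KeyError),
-- and for every matching review index the seven other keys are present (else KeyError) with
-- lists long enough (else IndexError).
def Pre_searchByKeyword (listName : List (String × List String)) (keyword : String) : Prop :=
  ((PySem.Dict.mk listName).get? "reviews").isSome = true ∧
  ∀ i < (pvCol listName "reviews").length,
    PySem.Str.isIn keyword (PySem.Str.lower ((pvCol listName "reviews").getD i "")) = true →
    ∀ f ∈ ["score", "hotel", "date", "country", "room", "title", "travellerType"],
      ((PySem.Dict.mk listName).get? f).isSome = true ∧ i < (pvCol listName f).length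
instance (listName : List (String × List String)) (keyword : String) : Decidable (Pre_searchByKeyword listName keyword) := by unfold Pre_searchByKeyword; infer_instance

def pvWitness_searchByKeyword : (List (String × List String)) × String :=
  ([("reviews", ["Good room", "bad"]), ("score", ["9", "2"]), ("hotel", ["H1", "H2"]),
    ("date", ["d1", "d2"]), ("country", ["c1", "c2"]), ("room", ["r1", "r2"]),
    ("title", ["t1", "t2"]), ("travellerType", ["solo", "pair"])], "oo")

def Spec_searchByKeyword (listName : List (String × List String)) (keyword : String) (out : List (String × List String)) : Prop := out = searchByKeyword_alt listName keyword
instance (listName : List (String × List String)) (keyword : String) (out : List (String × List String)) : Decidable (Spec_searchByKeyword listName keyword out) := by unfold Spec_searchByKeyword; infer_instance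

-- ===== CLAIM (what is proved, stated in full; the proofs are below) =====
def Claim_equal_searchByKeyword : Prop := ∀ (listName : List (String × List String)) (keyword : String), Dom_searchByKeyword listName keyword → Pre_searchByKeyword listName keyword → Spec_searchByKeyword listName keyword (searchByKeyword listName keyword)

-- ===== LEMMAS AND PROOFS =====

-- loop invariant: running A's fold from a dict holding accumulators a..h appends, column by
-- column, the fields of the matching indices of l
set_option maxHeartbeats 1600000 in
theorem pvLoop (listName : List (String × List String)) (keyword : String)
    (l : List Int) (a b c d e f g h : List String) :
    (l.foldl
      (fun g i =>
        if PySem.Str.isIn keyword (PySem.Str.lower (pvField listName "reviews" i)) then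
          ((((((((g.modify "reviews" [] (· ++ [pvField listName "reviews" i])).modify
            "score" [] (· ++ [pvField listName "score" i])).modify
            "hotel" [] (· ++ [pvField listName "hotel" i])).modify
            "date" [] (· ++ [pvField listName "date" i])).modify
            "country" [] (· ++ [pvField listName "country" i])).modify
            "room" [] (· ++ [pvField listName "room" i])).modify
            "title" [] (· ++ [pvField listName "title" i])).modify
            "travellerType" [] (· ++ [pvField listName "travellerType" i]))
        else g)
      (PySem.Dict.mk [("reviews", a), ("score", b), ("hotel", c), ("date", d),
        ("country", e), ("room", f), ("title", g), ("travellerType", h)])).items =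
    (let idx := l.filter
        (fun i => PySem.Str.isIn keyword (PySem.Str.lower (pvField listName "reviews" i)))
     [("reviews", a ++ idx.map (pvField listName "reviews")),
      ("score", b ++ idx.map (pvField listName "score")),
      ("hotel", c ++ idx.map (pvField listName "hotel")),
      ("date", d ++ idx.map (pvField listName "date")),
      ("country", e ++ idx.map (pvField listName "country")),
      ("room", f ++ idx.map (pvField listName "room")),
      ("title", g ++ idx.map (pvField listName "title")),
      ("travellerType", h ++ idx.map (pvField listName "travellerType"))]) := by
  induction l generalizing a b c d e f g h with
  | nil => simp
  | cons i t ih =>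
    by_cases hP : PySem.Str.isIn keyword (PySem.Str.lower (pvField listName "reviews" i)) = true
    · have hP' := hP
      simp at hP'
      simp only [List.foldl_cons, if_pos hP]
      have hstep :
          ((((((((PySem.Dict.mk [("reviews", a), ("score", b), ("hotel", c), ("date", d),
              ("country", e), ("room", f), ("title", g), ("travellerType", h)]).modify
            "reviews" [] (· ++ [pvField listName "reviews" i])).modify
            "score" [] (· ++ [pvField listName "score" i])).modify
            "hotel" [] (· ++ [pvField listName "hotel" i])).modify
            "date" [] (· ++ [pvField listName "date" i])).modify
            "country" [] (· ++ [pvField listName "country" i])).modify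
            "room" [] (· ++ [pvField listName "room" i])).modify
            "title" [] (· ++ [pvField listName "title" i])).modify
            "travellerType" [] (· ++ [pvField listName "travellerType" i]) =
          PySem.Dict.mk [("reviews", a ++ [pvField listName "reviews" i]),
            ("score", b ++ [pvField listName "score" i]),
            ("hotel", c ++ [pvField listName "hotel" i]),
            ("date", d ++ [pvField listName "date" i]),
            ("country", e ++ [pvField listName "country" i]),
            ("room", f ++ [pvField listName "room" i]),
            ("title", g ++ [pvField listName "title" i]),
            ("travellerType", h ++ [pvField listName "travellerType" i])] := rfl
      rw [hstep, ih]
      simp [hP', List.append_assoc]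
    · have hP' := hP
      simp at hP'
      simp only [List.foldl_cons, if_neg hP]
      rw [ih]
      simp [hP']

-- transpose invariant: each column of the kept records of the zipped rows is the gather of
-- that column at the matching indices, provided the matching indices are in range everywhere
theorem pvMaster (p : String → Bool) (c1 : List String) :
    ∀ (c2 c3 c4 c5 c6 c7 c8 : List String),
    (∀ i, i < c1.length → p (c1.getD i "") = true →
      i < c2.length ∧ i < c3.length ∧ i < c4.length ∧ i < c5.length ∧
      i < c6.length ∧ i < c7.length ∧ i < c8.length) →
    ((List.range c1.length).filter (fun i => p (c1.getD i ""))).map (fun i => c1.getD i "") =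
      ((pvZip8 c1 c2 c3 c4 c5 c6 c7 c8).filter (fun r => p r.1)).map (·.1) ∧
    ((List.range c1.length).filter (fun i => p (c1.getD i ""))).map (fun i => c2.getD i "") =
      ((pvZip8 c1 c2 c3 c4 c5 c6 c7 c8).filter (fun r => p r.1)).map (·.2.1) ∧
    ((List.range c1.length).filter (fun i => p (c1.getD i ""))).map (fun i => c3.getD i "") =
      ((pvZip8 c1 c2 c3 c4 c5 c6 c7 c8).filter (fun r => p r.1)).map (·.2.2.1) ∧
    ((List.range c1.length).filter (fun i => p (c1.getD i ""))).map (fun i => c4.getD i "") =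
      ((pvZip8 c1 c2 c3 c4 c5 c6 c7 c8).filter (fun r => p r.1)).map (·.2.2.2.1) ∧
    ((List.range c1.length).filter (fun i => p (c1.getD i ""))).map (fun i => c5.getD i "") =
      ((pvZip8 c1 c2 c3 c4 c5 c6 c7 c8).filter (fun r => p r.1)).map (·.2.2.2.2.1) ∧
    ((List.range c1.length).filter (fun i => p (c1.getD i ""))).map (fun i => c6.getD i "") =
      ((pvZip8 c1 c2 c3 c4 c5 c6 c7 c8).filter (fun r => p r.1)).map (·.2.2.2.2.2.1) ∧
    ((List.range c1.length).filter (fun i => p (c1.getD i ""))).map (fun i => c7.getD i "") =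
      ((pvZip8 c1 c2 c3 c4 c5 c6 c7 c8).filter (fun r => p r.1)).map (·.2.2.2.2.2.2.1) ∧
    ((List.range c1.length).filter (fun i => p (c1.getD i ""))).map (fun i => c8.getD i "") =
      ((pvZip8 c1 c2 c3 c4 c5 c6 c7 c8).filter (fun r => p r.1)).map (·.2.2.2.2.2.2.2) := by
  induction c1 with
  | nil => intro c2 c3 c4 c5 c6 c7 c8 _; simp [pvZip8]
  | cons a t ih =>
    intro c2 c3 c4 c5 c6 c7 c8 H
    have hidx : ∀ (g : Nat → String),
        ((List.range (a :: t).length).filter (fun i => p ((a :: t).getD i ""))).map g =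
        (if p a then [g 0] else []) ++
        (((List.range t.length).filter (fun i => p (t.getD i ""))).map (fun i => g (i + 1))) := by
      intro g
      have : (a :: t).length = t.length + 1 := rfl
      rw [this, List.range_succ_eq_map]
      simp only [List.filter_cons, List.filter_map]
      by_cases hp : p a = true
      · simp [hp, Function.comp_def]
      · simp [hp, Function.comp_def]
    match c2, c3, c4, c5, c6, c7, c8 with
    | b2 :: t2, b3 :: t3, b4 :: t4, b5 :: t5, b6 :: t6, b7 :: t7, b8 :: t8 =>
      have H' : ∀ i, i < t.length → p (t.getD i "") = true →
          i < t2.length ∧ i < t3.length ∧ i < t4.length ∧ i < t5.length ∧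
          i < t6.length ∧ i < t7.length ∧ i < t8.length := by
        intro i hi hp
        have := H (i + 1) (by simpa using Nat.succ_lt_succ hi) (by simpa using hp)
        simp only [List.length_cons] at this
        omega
      obtain ⟨e1, e2, e3, e4, e5, e6, e7, e8⟩ := ih t2 t3 t4 t5 t6 t7 t8 H'
      by_cases hp : p a = true <;>
        [refine ⟨?_, ?_, ?_, ?_, ?_, ?_, ?_, ?_⟩; refine ⟨?_, ?_, ?_, ?_, ?_, ?_, ?_, ?_⟩] <;>
        (rw [hidx]
         simp only [pvZip8, List.filter_cons, List.getD_cons_succ, List.getD_cons_zero, hp,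
           Bool.false_eq_true, if_true, if_false, List.nil_append,
           List.cons_append, List.map_cons]
         first
           | rw [e1] | rw [e2] | rw [e3] | rw [e4] | rw [e5] | rw [e6] | rw [e7] | rw [e8])
    | [], c3, c4, c5, c6, c7, c8 => 
        have hempty : ((List.range (a :: t).length).filter (fun i => p ((a :: t).getD i ""))) = [] := by
          rw [List.filter_eq_nil_iff]
          intro i hi hp
          have := H i (List.mem_range.mp hi) hp
          simp at this
        refine ⟨?_, ?_, ?_, ?_, ?_, ?_, ?_, ?_⟩ <;> rw [hempty] <;> simp [pvZip8]
    | _ :: _, [], c4, c5, c6, c7, c8 => 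
        have hempty : ((List.range (a :: t).length).filter (fun i => p ((a :: t).getD i ""))) = [] := by
          rw [List.filter_eq_nil_iff]
          intro i hi hp
          have := H i (List.mem_range.mp hi) hp
          simp at this
        refine ⟨?_, ?_, ?_, ?_, ?_, ?_, ?_, ?_⟩ <;> rw [hempty] <;> simp [pvZip8]
    | _ :: _, _ :: _, [], c5, c6, c7, c8 => 
        have hempty : ((List.range (a :: t).length).filter (fun i => p ((a :: t).getD i ""))) = [] := by
          rw [List.filter_eq_nil_iff]
          intro i hi hp
          have := H i (List.mem_range.mp hi) hp
          simp at this
        refine ⟨?_, ?_, ?_, ?_, ?_, ?_, ?_, ?_⟩ <;> rw [hempty] <;> simp [pvZip8]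
    | _ :: _, _ :: _, _ :: _, [], c6, c7, c8 => 
        have hempty : ((List.range (a :: t).length).filter (fun i => p ((a :: t).getD i ""))) = [] := by
          rw [List.filter_eq_nil_iff]
          intro i hi hp
          have := H i (List.mem_range.mp hi) hp
          simp at this
        refine ⟨?_, ?_, ?_, ?_, ?_, ?_, ?_, ?_⟩ <;> rw [hempty] <;> simp [pvZip8]
    | _ :: _, _ :: _, _ :: _, _ :: _, [], c7, c8 => 
        have hempty : ((List.range (a :: t).length).filter (fun i => p ((a :: t).getD i ""))) = [] := by
          rw [List.filter_eq_nil_iff]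
          intro i hi hp
          have := H i (List.mem_range.mp hi) hp
          simp at this
        refine ⟨?_, ?_, ?_, ?_, ?_, ?_, ?_, ?_⟩ <;> rw [hempty] <;> simp [pvZip8]
    | _ :: _, _ :: _, _ :: _, _ :: _, _ :: _, [], c8 => 
        have hempty : ((List.range (a :: t).length).filter (fun i => p ((a :: t).getD i ""))) = [] := by
          rw [List.filter_eq_nil_iff]
          intro i hi hp
          have := H i (List.mem_range.mp hi) hp
          simp at this
        refine ⟨?_, ?_, ?_, ?_, ?_, ?_, ?_, ?_⟩ <;> rw [hempty] <;> simp [pvZip8]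
    | _ :: _, _ :: _, _ :: _, _ :: _, _ :: _, _ :: _, [] => 
        have hempty : ((List.range (a :: t).length).filter (fun i => p ((a :: t).getD i ""))) = [] := by
          rw [List.filter_eq_nil_iff]
          intro i hi hp
          have := H i (List.mem_range.mp hi) hp
          simp at this
        refine ⟨?_, ?_, ?_, ?_, ?_, ?_, ?_, ?_⟩ <;> rw [hempty] <;> simp [pvZip8]

-- ===== VERDICT (by name: the statement is the Claim_ definition above) =====
theorem searchByKeyword_spec : Claim_equal_searchByKeyword := by
  intro listName keyword _ hpre
  unfold Spec_searchByKeyword searchByKeyword searchByKeyword_alt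
  rw [pvLoop]
  have hrange := PySem.List.pyRange_zero_natCast (pvCol listName "reviews").length
  have hfield : ∀ f k, pvField listName f ((k : Nat) : Int) = (pvCol listName f).getD k "" := by
    intro f k
    simp [pvField]
  obtain ⟨e1, e2, e3, e4, e5, e6, e7, e8⟩ :=
    pvMaster (fun s => PySem.Str.isIn keyword (PySem.Str.lower s))
      (pvCol listName "reviews") (pvCol listName "score") (pvCol listName "hotel")
      (pvCol listName "date") (pvCol listName "country") (pvCol listName "room")
      (pvCol listName "title") (pvCol listName "travellerType")
      (by
        intro i hi hp
        have h2 := fun f hf => (hpre.2 i hi hp f hf).2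
        exact ⟨h2 _ (by simp), h2 _ (by simp), h2 _ (by simp), h2 _ (by simp),
          h2 _ (by simp), h2 _ (by simp), h2 _ (by simp)⟩)
  simp only [hrange, List.filter_map, List.map_map, Function.comp_def, hfield,
    List.nil_append]
  rw [e1, e2, e3, e4, e5, e6, e7, e8]
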